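-- pv_equiv track=rewrite | github.com/orangetect/-PDF-JPG- | pdf_to_jpg_gui.py | parse_page_selection
-- ===== SOURCE A (Python) =====
-- def parse_page_selection(selection, total_pages):
--     selection = selection.strip().lower().replace("，", ",")
--     pages = set()
--
--     if selection in ["", "all"]:
--         return list(range(1, total_pages + 1))
--     if selection == "odd":
--         return [i for i in range(1, total_pages + 1) if i % 2 == 1]
--     if selection == "even":
--         return [i for i in range(1, total_pages + 1) if i % 2 == 0]
--
--     for part in selection.split(","):
--         part = part.strip()
--         if "-" in part:
--             start, end = part.split("-")
--             if start.isdigit() and end.isdigit():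
--                 pages.update(range(int(start), int(end) + 1))
--         elif part.isdigit():
--             pages.add(int(part))
--
--     return sorted([p for p in pages if 1 <= p <= total_pages])
-- ===== SOURCE B (Python) =====
-- def parse_page_selection(selection, total_pages):
--     selection = selection.strip().lower().replace("，", ",")
--
--     if selection in ["", "all"]:
--         return list(range(1, total_pages + 1))
--     if selection == "odd":
--         return [i for i in range(1, total_pages + 1) if i % 2 == 1]
--     if selection == "even":
--         return [i for i in range(1, total_pages + 1) if i % 2 == 0]
--
--     ivs = []
--     for part in selection.split(","):
--         part = part.strip()
--         if "-" in part:
--             pieces = part.split("-")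
--             if len(pieces) == 2 and pieces[0].isdigit() and pieces[1].isdigit():
--                 lo, hi = max(int(pieces[0]), 1), min(int(pieces[1]), total_pages)
--                 if lo <= hi:
--                     ivs.append((lo, hi))
--         elif part.isdigit():
--             p = int(part)
--             if 1 <= p <= total_pages:
--                 ivs.append((p, p))
--     ivs.sort(key=lambda iv: iv[0])
--     out = []
--     for lo, hi in ivs:
--         if out and lo <= out[-1]:
--             lo = out[-1] + 1
--         out.extend(range(lo, hi + 1))
--     return out
-- ===== Notes on version B (the rewrite author's own statement) =====
-- stated objective: alternative
-- what changed: B replaces A's accumulate-pages-into-a-set-then-sort-and-filter collection by an interval sweep: each part becomes one interval clipped to 1..total_pages, the intervals are sorted by start and merged in a single pass that emits the sorted deduplicated page list directly, so no per-page set and no per-page sort remain.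
import Mathlib
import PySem

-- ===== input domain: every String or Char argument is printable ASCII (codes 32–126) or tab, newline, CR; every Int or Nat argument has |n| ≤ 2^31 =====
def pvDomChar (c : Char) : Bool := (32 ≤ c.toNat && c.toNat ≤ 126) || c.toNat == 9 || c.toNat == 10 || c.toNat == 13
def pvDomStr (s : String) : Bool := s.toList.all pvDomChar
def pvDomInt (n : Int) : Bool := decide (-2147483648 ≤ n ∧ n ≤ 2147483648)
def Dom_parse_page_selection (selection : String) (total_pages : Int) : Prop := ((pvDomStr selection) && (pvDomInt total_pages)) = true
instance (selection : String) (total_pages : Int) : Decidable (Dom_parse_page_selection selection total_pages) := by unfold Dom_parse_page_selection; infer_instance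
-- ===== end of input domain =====

-- B replaces A's accumulate-into-a-set-then-sort-and-filter collection by an interval sweep:
-- each part yields one interval clipped to 1..total_pages, the intervals are sorted by start
-- and merged in one pass, so the sorted deduplicated page list is emitted directly;
-- equivalence is proved on inputs where A does not raise (Pre_ below).

-- ===== PORT A =====
-- A's loop body: pages.update(range)/pages.add on each comma-separated part.
def pvAStep (pages : PySem.Set Int) (part0 : String) : PySem.Set Int :=
  if PySem.Str.isIn "-" (PySem.Str.strip part0) then
    match (PySem.Str.split? (PySem.Str.strip part0) "-").getD [] with
    | [st, en] =>
      if PySem.Str.strIsdigit st && PySem.Str.strIsdigit en then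
        pages.update (PySem.List.pyRange ((PySem.Int.ofStr? st).getD 0) ((PySem.Int.ofStr? en).getD 0 + 1) 1)
      else pages
    | _ => pages  -- Python raises ValueError here (tuple unpacking); such inputs are outside Pre_
  else if PySem.Str.strIsdigit (PySem.Str.strip part0) then
    pages.add ((PySem.Int.ofStr? (PySem.Str.strip part0)).getD 0)
  else pages

def parse_page_selection (selection : String) (total_pages : Int) : List Int :=
  let sel := PySem.Str.replace (PySem.Str.lower (PySem.Str.strip selection)) "，" ","
  if sel = "" ∨ sel = "all" then PySem.List.pyRange 1 (total_pages + 1) 1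
  else if sel = "odd" then (PySem.List.pyRange 1 (total_pages + 1) 1).filter (fun i => PySem.Int.mod i 2 == 1)
  else if sel = "even" then (PySem.List.pyRange 1 (total_pages + 1) 1).filter (fun i => PySem.Int.mod i 2 == 0)
  else
    let pages := ((PySem.Str.split? sel ",").getD []).foldl pvAStep PySem.Set.empty
    PySem.List.sorted (pages.filter (fun p => decide (1 ≤ p) && decide (p ≤ total_pages))) (fun p => p) false

-- ===== PORT B =====
-- B's first loop body: one clipped interval (or nothing) per comma-separated part.
def pvIvStep (n : Int) (ivs : List (Int × Int)) (part0 : String) : List (Int × Int) :=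
  if PySem.Str.isIn "-" (PySem.Str.strip part0) then
    match (PySem.Str.split? (PySem.Str.strip part0) "-").getD [] with
    | [st, en] =>
      if PySem.Str.strIsdigit st && PySem.Str.strIsdigit en then
        if max ((PySem.Int.ofStr? st).getD 0) 1 ≤ min ((PySem.Int.ofStr? en).getD 0) n then
          ivs ++ [(max ((PySem.Int.ofStr? st).getD 0) 1, min ((PySem.Int.ofStr? en).getD 0) n)]
        else ivs
      else ivs
    | _ => ivs
  else if PySem.Str.strIsdigit (PySem.Str.strip part0) then
    if 1 ≤ (PySem.Int.ofStr? (PySem.Str.strip part0)).getD 0 ∧ (PySem.Int.ofStr? (PySem.Str.strip part0)).getD 0 ≤ n then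
      ivs ++ [((PySem.Int.ofStr? (PySem.Str.strip part0)).getD 0, (PySem.Int.ofStr? (PySem.Str.strip part0)).getD 0)]
    else ivs
  else ivs

-- B's second loop body: merge one start-sorted interval into the output (out[-1] is getLast).
def pvEmit (out : List Int) (iv : Int × Int) : List Int :=
  if out ≠ [] ∧ iv.1 ≤ out.getLast?.getD 0 then
    out ++ PySem.List.pyRange (out.getLast?.getD 0 + 1) (iv.2 + 1) 1
  else
    out ++ PySem.List.pyRange iv.1 (iv.2 + 1) 1

def parse_page_selection_alt (selection : String) (total_pages : Int) : List Int :=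
  let sel := PySem.Str.replace (PySem.Str.lower (PySem.Str.strip selection)) "，" ","
  if sel = "" ∨ sel = "all" then PySem.List.pyRange 1 (total_pages + 1) 1
  else if sel = "odd" then (PySem.List.pyRange 1 (total_pages + 1) 1).filter (fun i => PySem.Int.mod i 2 == 1)
  else if sel = "even" then (PySem.List.pyRange 1 (total_pages + 1) 1).filter (fun i => PySem.Int.mod i 2 == 0)
  else
    let ivs := ((PySem.Str.split? sel ",").getD []).foldl (pvIvStep total_pages) []
    let ivs := PySem.List.sorted ivs (fun iv => iv.1) false
    ivs.foldl pvEmit []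

-- ===== PRECONDITION & SPEC =====
-- Pre_ excludes exactly the inputs on which A raises ValueError (tuple unpacking):
-- a comma-part whose stripped form contains '-' but splits into more than two pieces, e.g. "1-2-3".
def Pre_parse_page_selection (selection : String) (total_pages : Int) : Prop :=
  ∀ part ∈ (PySem.Str.split? (PySem.Str.replace (PySem.Str.lower (PySem.Str.strip selection)) "，" ",") ",").getD [],
    PySem.Str.isIn "-" (PySem.Str.strip part) = true →
    ((PySem.Str.split? (PySem.Str.strip part) "-").getD []).length = 2
instance (selection : String) (total_pages : Int) : Decidable (Pre_parse_page_selection selection total_pages) := by unfold Pre_parse_page_selection; infer_instance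

def pvWitness_parse_page_selection : String × Int := ("1-3,5", 10)

def Spec_parse_page_selection (selection : String) (total_pages : Int) (out : List Int) : Prop := out = parse_page_selection_alt selection total_pages
instance (selection : String) (total_pages : Int) (out : List Int) : Decidable (Spec_parse_page_selection selection total_pages out) := by unfold Spec_parse_page_selection; infer_instance

-- ===== CLAIM (what is proved, stated in full; the proofs are below) =====
def Claim_equal_parse_page_selection : Prop := ∀ (selection : String) (total_pages : Int), Dom_parse_page_selection selection total_pages → Pre_parse_page_selection selection total_pages → Spec_parse_page_selection selection total_pages (parse_page_selection selection total_pages)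

-- ===== LEMMAS AND PROOFS =====

-- the last element of a strictly increasing list is in it and bounds every element
lemma pv_getLast_mem (l : List Int) (h : l ≠ []) : l.getLast?.getD 0 ∈ l := by
  cases hl : l.getLast? with
  | none => rw [List.getLast?_eq_none_iff] at hl; exact absurd hl h
  | some a => simpa [hl] using List.mem_of_getLast? hl

lemma pv_getLast_ub : ∀ (l : List Int), l.Pairwise (· < ·) → ∀ y ∈ l, y ≤ l.getLast?.getD 0 := by
  intro l
  induction l with
  | nil => simp
  | cons a t ih =>
    intro hp y hy
    rcases List.mem_cons.1 hy with rfl | hyt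
    · cases t with
      | nil => simp
      | cons b t' =>
        rw [List.getLast?_cons_cons]
        have hmem : (b :: t').getLast?.getD 0 ∈ b :: t' := pv_getLast_mem _ (by simp)
        have := (List.pairwise_cons.1 hp).1 _ hmem
        omega
    · cases t with
      | nil => simp at hyt
      | cons b t' =>
        rw [List.getLast?_cons_cons]
        exact ih hp.of_cons y hyt

-- merging one start-sorted interval into a strictly increasing, left-covering output
lemma pv_emit_step (out : List Int) (iv : Int × Int) (hout : out.Pairwise (· < ·))
    (hcur : ∀ x : Int, iv.1 ≤ x → x ∈ out ∨ (∀ y ∈ out, y < x)) :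
    (pvEmit out iv).Pairwise (· < ·) ∧
    (∀ x : Int, x ∈ pvEmit out iv ↔ x ∈ out ∨ (iv.1 ≤ x ∧ x ≤ iv.2)) := by
  unfold pvEmit
  by_cases hc : out ≠ [] ∧ iv.1 ≤ out.getLast?.getD 0
  · rw [if_pos hc]
    obtain ⟨hne, hlo⟩ := hc
    have hLmem : out.getLast?.getD 0 ∈ out := pv_getLast_mem out hne
    have hLub : ∀ y ∈ out, y ≤ out.getLast?.getD 0 := pv_getLast_ub out hout
    constructor
    · rw [List.pairwise_append]
      refine ⟨hout, PySem.List.pairwise_lt_pyRange_one _ _, ?_⟩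
      intro y hy z hz
      have hz' := PySem.List.mem_pyRange_one.1 hz
      have := hLub y hy
      omega
    · intro x
      simp only [List.mem_append, PySem.List.mem_pyRange_one]
      constructor
      · rintro (h | h)
        · exact Or.inl h
        · have := hLub _ hLmem
          exact Or.inr ⟨by omega, by omega⟩
      · rintro (h | ⟨h1, h2⟩)
        · exact Or.inl h
        · rcases hcur x h1 with h | h
          · exact Or.inl h
          · have := h _ hLmem
            exact Or.inr ⟨by omega, by omega⟩
  · rw [if_neg hc]
    have hcase : out = [] ∨ (out ≠ [] ∧ out.getLast?.getD 0 < iv.1) := by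
      by_cases hne : out = []
      · exact Or.inl hne
      · right
        refine ⟨hne, ?_⟩
        by_contra hcon
        exact hc ⟨hne, by omega⟩
    constructor
    · rw [List.pairwise_append]
      refine ⟨hout, PySem.List.pairwise_lt_pyRange_one _ _, ?_⟩
      intro y hy z hz
      have hz' := PySem.List.mem_pyRange_one.1 hz
      rcases hcase with rfl | ⟨hne, hlt⟩
      · simp at hy
      · have := pv_getLast_ub out hout y hy
        omega
    · intro x
      simp only [List.mem_append, PySem.List.mem_pyRange_one]
      constructor
      · rintro (h | h)
        · exact Or.inl h
        · exact Or.inr ⟨by omega, by omega⟩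
      · rintro (h | ⟨h1, h2⟩)
        · exact Or.inl h
        · exact Or.inr ⟨h1, by omega⟩

-- the whole merge loop: strictly increasing output whose members are the intervals' union
lemma pv_emit_inv : ∀ (ivs : List (Int × Int)) (out : List Int),
    ivs.Pairwise (fun a b => a.1 ≤ b.1) →
    out.Pairwise (· < ·) →
    (∀ iv ∈ ivs, ∀ x : Int, iv.1 ≤ x → x ∈ out ∨ (∀ y ∈ out, y < x)) →
    (ivs.foldl pvEmit out).Pairwise (· < ·) ∧
    (∀ x : Int, x ∈ ivs.foldl pvEmit out ↔ x ∈ out ∨ ∃ iv ∈ ivs, iv.1 ≤ x ∧ x ≤ iv.2) := by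
  intro ivs
  induction ivs with
  | nil => intro out _ hout _; exact ⟨hout, by simp⟩
  | cons iv rest ih =>
    intro out hpair hout hcov
    have hstep := pv_emit_step out iv hout (hcov iv (by simp))
    have hcov' : ∀ iv' ∈ rest, ∀ x : Int, iv'.1 ≤ x → x ∈ pvEmit out iv ∨ (∀ y ∈ pvEmit out iv, y < x) := by
      intro iv' hiv' x hx
      have hle : iv.1 ≤ iv'.1 := (List.pairwise_cons.1 hpair).1 iv' hiv'
      rcases hcov iv (by simp) x (by omega) with h | h
      · exact Or.inl ((hstep.2 x).2 (Or.inl h))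
      · by_cases hxhi : x ≤ iv.2
        · exact Or.inl ((hstep.2 x).2 (Or.inr ⟨by omega, hxhi⟩))
        · right
          intro y hy
          rcases (hstep.2 y).1 hy with hy' | hy'
          · exact h y hy'
          · omega
    have := ih (pvEmit out iv) (List.pairwise_cons.1 hpair).2 hstep.1 hcov'
    refine ⟨this.1, ?_⟩
    intro x
    rw [List.foldl_cons, this.2 x, hstep.2 x]
    constructor
    · rintro ((h | h) | ⟨iv', hiv', h⟩)
      · exact Or.inl h
      · exact Or.inr ⟨iv, by simp, h⟩
      · exact Or.inr ⟨iv', by simp [hiv'], h⟩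
    · rintro (h | ⟨iv', hiv', h⟩)
      · exact Or.inl (Or.inl h)
      · rcases List.mem_cons.1 hiv' with rfl | hiv''
        · exact Or.inl (Or.inr h)
        · exact Or.inr ⟨iv', hiv'', h⟩

-- one part: the interval list and A's page set stay related
lemma pv_iv_step (n : Int) (part : String)
    (hp : PySem.Str.isIn "-" (PySem.Str.strip part) = true →
          ((PySem.Str.split? (PySem.Str.strip part) "-").getD []).length = 2)
    (S : PySem.Set Int) (acc : List (Int × Int))
    (hrel : ∀ x : Int, (∃ iv ∈ acc, iv.1 ≤ x ∧ x ≤ iv.2) ↔ x ∈ S ∧ 1 ≤ x ∧ x ≤ n) :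
    ∀ x : Int, (∃ iv ∈ pvIvStep n acc part, iv.1 ≤ x ∧ x ≤ iv.2) ↔
      x ∈ pvAStep S part ∧ 1 ≤ x ∧ x ≤ n := by
  unfold pvIvStep pvAStep
  by_cases hd : PySem.Str.isIn "-" (PySem.Str.strip part) = true
  · have hp2 := hp hd
    simp only [hd, if_true]
    generalize hl : (PySem.Str.split? (PySem.Str.strip part) "-").getD [] = l at hp2 ⊢
    rcases l with _ | ⟨st, _ | ⟨en, _ | ⟨z, r⟩⟩⟩ <;> simp only [List.length] at hp2 <;> try omega
    by_cases hdig : (PySem.Str.strIsdigit st && PySem.Str.strIsdigit en) = true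
    · simp only [hdig, if_true]
      intro x
      by_cases hne : max ((PySem.Int.ofStr? st).getD 0) 1 ≤ min ((PySem.Int.ofStr? en).getD 0) n
      · rw [if_pos hne]
        simp only [List.mem_append, List.mem_singleton, PySem.Set.mem_update,
          PySem.List.mem_pyRange_one]
        constructor
        · rintro ⟨iv, hiv | hiv, hx1, hx2⟩
          · have := (hrel x).1 ⟨iv, hiv, hx1, hx2⟩
            exact ⟨Or.inl this.1, this.2.1, this.2.2⟩
          · subst hiv
            simp only at hx1 hx2
            exact ⟨Or.inr ⟨by omega, by omega⟩, by omega, by omega⟩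
        · rintro ⟨hS | ⟨h1, h2⟩, hx1, hx2⟩
          · obtain ⟨iv, hiv, h⟩ := (hrel x).2 ⟨hS, hx1, hx2⟩
            exact ⟨iv, Or.inl hiv, h⟩
          · exact ⟨_, Or.inr rfl, by simp; omega⟩
      · rw [if_neg hne]
        rw [hrel x]
        simp only [PySem.Set.mem_update, PySem.List.mem_pyRange_one]
        constructor
        · rintro ⟨hS, hx1, hx2⟩
          exact ⟨Or.inl hS, hx1, hx2⟩
        · rintro ⟨hS | ⟨h1, h2⟩, hx1, hx2⟩
          · exact ⟨hS, hx1, hx2⟩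
          · omega
    · simp only [hdig]
      exact hrel
  · rw [if_neg hd, if_neg hd]
    by_cases hdig : PySem.Str.strIsdigit (PySem.Str.strip part) = true
    · rw [if_pos hdig, if_pos hdig]
      set p : Int := (PySem.Int.ofStr? (PySem.Str.strip part)).getD 0 with hpdef
      intro x
      by_cases hin : 1 ≤ p ∧ p ≤ n
      · rw [if_pos hin]
        simp only [List.mem_append, List.mem_singleton, PySem.Set.mem_add]
        constructor
        · rintro ⟨iv, hiv | hiv, hx1, hx2⟩
          · have := (hrel x).1 ⟨iv, hiv, hx1, hx2⟩
            exact ⟨Or.inl this.1, this.2.1, this.2.2⟩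
          · subst hiv
            simp only at hx1 hx2
            exact ⟨Or.inr (by omega), by omega, by omega⟩
        · rintro ⟨hS | hxe, hx1, hx2⟩
          · obtain ⟨iv, hiv, h⟩ := (hrel x).2 ⟨hS, hx1, hx2⟩
            exact ⟨iv, Or.inl hiv, h⟩
          · exact ⟨(p, p), Or.inr rfl, by omega, by omega⟩
      · rw [if_neg hin]
        rw [hrel x]
        simp only [PySem.Set.mem_add]
        constructor
        · rintro ⟨hS, hx1, hx2⟩
          exact ⟨Or.inl hS, hx1, hx2⟩
        · rintro ⟨hS | hxe, hx1, hx2⟩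
          · exact ⟨hS, hx1, hx2⟩
          · exfalso; omega
    · rw [if_neg hdig, if_neg hdig]
      exact hrel

-- the whole first loop keeps them related
lemma pv_iv_fold (n : Int) (parts : List String)
    (hp : ∀ part ∈ parts, PySem.Str.isIn "-" (PySem.Str.strip part) = true →
          ((PySem.Str.split? (PySem.Str.strip part) "-").getD []).length = 2) :
    ∀ (S : PySem.Set Int) (acc : List (Int × Int)),
    (∀ x : Int, (∃ iv ∈ acc, iv.1 ≤ x ∧ x ≤ iv.2) ↔ x ∈ S ∧ 1 ≤ x ∧ x ≤ n) →
    ∀ x : Int, (∃ iv ∈ parts.foldl (pvIvStep n) acc, iv.1 ≤ x ∧ x ≤ iv.2) ↔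
      x ∈ parts.foldl pvAStep S ∧ 1 ≤ x ∧ x ≤ n := by
  induction parts with
  | nil => intro S acc h; exact h
  | cons part rest ih =>
    intro S acc h
    rw [List.foldl_cons]
    conv => rw [List.foldl_cons]
    exact ih (fun q hq => hp q (List.mem_cons_of_mem part hq)) (pvAStep S part)
      (pvIvStep n acc part) (pv_iv_step n part (hp part List.mem_cons_self) S acc h)

lemma pv_step_nodup (S : PySem.Set Int) (part : String) (h : S.Nodup) : (pvAStep S part).Nodup := by
  unfold pvAStep
  by_cases hd : PySem.Str.isIn "-" (PySem.Str.strip part) = true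
  · rw [if_pos hd]
    generalize (PySem.Str.split? (PySem.Str.strip part) "-").getD [] = l
    rcases l with _ | ⟨st, _ | ⟨en, _ | ⟨z, r⟩⟩⟩
    · exact h
    · exact h
    · by_cases hdig : (PySem.Str.strIsdigit st && PySem.Str.strIsdigit en) = true
      · show ((if PySem.Str.strIsdigit st && PySem.Str.strIsdigit en then _ else S) : PySem.Set Int).Nodup
        rw [if_pos hdig]
        exact PySem.Set.nodup_update _ _ h
      · show ((if PySem.Str.strIsdigit st && PySem.Str.strIsdigit en then _ else S) : PySem.Set Int).Nodup
        rw [if_neg hdig]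
        exact h
    · exact h
  · rw [if_neg hd]
    by_cases hdig : PySem.Str.strIsdigit (PySem.Str.strip part) = true
    · rw [if_pos hdig]
      exact PySem.Set.nodup_add _ _ h
    · rw [if_neg hdig]
      exact h

lemma pv_nodup_fold (parts : List String) : ∀ (S : PySem.Set Int), S.Nodup → (parts.foldl pvAStep S).Nodup := by
  induction parts with
  | nil => intro S h; exact h
  | cons part rest ih => intro S h; exact ih _ (pv_step_nodup S part h)

-- ===== VERDICT (by name: the statement is the Claim_ definition above) =====
theorem parse_page_selection_spec : Claim_equal_parse_page_selection := by
  intro selection total_pages _ hpre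
  unfold Spec_parse_page_selection parse_page_selection parse_page_selection_alt
  unfold Pre_parse_page_selection at hpre
  set sel := PySem.Str.replace (PySem.Str.lower (PySem.Str.strip selection)) "，" "," with hsel
  by_cases h1 : sel = "" ∨ sel = "all"
  · simp only [h1, if_true]
  simp only [h1, if_false]
  by_cases h2 : sel = "odd"
  · simp only [h2, if_true]
  simp only [h2, if_false]
  by_cases h3 : sel = "even"
  · simp only [h3, if_true]
  simp only [h3, if_false]
  set parts := (PySem.Str.split? sel ",").getD [] with hparts
  set S := parts.foldl pvAStep (PySem.Set.empty : PySem.Set Int) with hS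
  set ivs0 := parts.foldl (pvIvStep total_pages) ([] : List (Int × Int)) with hivs0
  set ivs := PySem.List.sorted ivs0 (fun iv => iv.1) false with hivs
  have hrel0 : ∀ x : Int, (∃ iv ∈ ([] : List (Int × Int)), iv.1 ≤ x ∧ x ≤ iv.2) ↔
      x ∈ (PySem.Set.empty : PySem.Set Int) ∧ 1 ≤ x ∧ x ≤ total_pages := by
    intro x
    simp [PySem.Set.empty]
  have hmem0 := pv_iv_fold total_pages parts hpre PySem.Set.empty [] hrel0
  have hmem_ivs : ∀ x : Int, (∃ iv ∈ ivs, iv.1 ≤ x ∧ x ≤ iv.2) ↔ x ∈ S ∧ 1 ≤ x ∧ x ≤ total_pages := by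
    intro x
    rw [← hmem0 x, hivs]
    simp only [PySem.List.mem_sorted]
    rw [hivs0]
  have hpair : ivs.Pairwise (fun a b => a.1 ≤ b.1) := PySem.List.sorted_pairwise _ _
  obtain ⟨hP, hM⟩ := pv_emit_inv ivs [] hpair List.Pairwise.nil
    (by intro iv _ x _; right; intro y hy; simp at hy)
  have hndS : S.Nodup := pv_nodup_fold parts _ List.nodup_nil
  refine PySem.List.sorted_eq_of_perm_of_pairwise_lt _ _ _ ?_ hP
  rw [List.perm_ext_iff_of_nodup (hP.imp (fun h => ne_of_lt h)) (List.Nodup.filter _ hndS)]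
  intro a
  rw [hM a, List.mem_filter]
  simp only [List.not_mem_nil, false_or, Bool.and_eq_true, decide_eq_true_eq]
  rw [hmem_ivs a]
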